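-- pv_equiv track=rewrite | github.com/EffectiveAgileDev/RAG_Scraper | src/file_generator/enhanced_text_file_generator.py | _format_menu_items
-- ===== SOURCE A (Python) =====
-- from typing import List, Dict, Any, Optional
--
-- def _format_menu_items(menu_items: Dict[str, List[str]]) -> List[str]:
--     """Format menu items for output."""
--     menu_lines = []
--
--     section_order = [
--         "appetizers",
--         "entrees",
--         "mains",
--         "main_courses",
--         "desserts",
--         "drinks",
--         "beverages",
--     ]
--
--     for section_key in section_order:
--         if section_key in menu_items and menu_items[section_key]:
--             section_name = section_key.upper().replace("_", " ")
--             items = menu_items[section_key]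
--             if isinstance(items, list):
--                 items_str = ", ".join(items)
--                 menu_lines.append(f"{section_name}: {items_str}")
--
--     # Handle any remaining sections
--     for section_key, items in menu_items.items():
--         if section_key not in section_order and items:
--             section_name = section_key.upper().replace("_", " ")
--             if isinstance(items, list):
--                 items_str = ", ".join(items)
--                 menu_lines.append(f"{section_name}: {items_str}")
--
--     return menu_lines
-- ===== SOURCE B (Python) =====
-- def _format_menu_items(menu_items):
--     """Format menu items for output."""
--     section_order = [
--         "appetizers",
--         "entrees",
--         "mains",
--         "main_courses",
--         "desserts",
--         "drinks",
--         "beverages",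
--     ]
--     # Decorate-sort-emit: give every entry a precedence rank (its position in
--     # section_order, or past-the-end keeping insertion order for the rest),
--     # sort once by that rank, then emit the lines from the sorted entries.
--     rank = {k: i for i, k in enumerate(section_order)}
--     n = len(section_order)
--     ordered = sorted(
--         enumerate(menu_items.items()),
--         key=lambda t: rank.get(t[1][0], n + t[0]),
--     )
--     return [
--         f"{k.upper().replace('_', ' ')}: {', '.join(v)}"
--         for _, (k, v) in ordered
--         if v and isinstance(v, list)
--     ]
-- ===== Notes on version B (the rewrite author's own statement) =====
-- stated objective: alternative
-- what changed: B is a decorate-sort-emit: each dict entry gets a numeric precedence rank (position in section_order, or past-the-end preserving insertion index), the entries are sorted once by that rank, and the lines are emitted from the sorted list, replacing A's two separate emitting scans.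
import Mathlib
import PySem

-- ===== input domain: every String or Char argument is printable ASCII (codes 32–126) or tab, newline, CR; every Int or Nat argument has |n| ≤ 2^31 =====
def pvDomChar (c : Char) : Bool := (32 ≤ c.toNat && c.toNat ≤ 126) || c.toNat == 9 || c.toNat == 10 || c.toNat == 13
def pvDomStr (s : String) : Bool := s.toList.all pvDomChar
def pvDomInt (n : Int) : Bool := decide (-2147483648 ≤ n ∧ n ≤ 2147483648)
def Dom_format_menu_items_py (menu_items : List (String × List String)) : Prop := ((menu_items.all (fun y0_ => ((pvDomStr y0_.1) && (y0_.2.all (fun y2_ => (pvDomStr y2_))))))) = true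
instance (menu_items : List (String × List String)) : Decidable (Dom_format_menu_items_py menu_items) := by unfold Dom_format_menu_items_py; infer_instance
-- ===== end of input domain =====

-- B replaces A's two emitting scans by decorate-sort-emit: rank every entry once, sort by rank, emit in one pass (alternative decomposition, same practical cost).

-- ===== PORT A =====
-- the fixed section order of both Pythons
def pvSectionOrder : List String :=
  ["appetizers", "entrees", "mains", "main_courses", "desserts", "drinks", "beverages"]

-- f"{key.upper().replace('_', ' ')}: {', '.join(items)}"
def pvLine (k : String) (v : List String) : String :=
  PySem.Str.replace (PySem.Str.upper k) "_" " " ++ ": " ++ PySem.Str.join ", " v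

def format_menu_items_py (menu_items : List (String × List String)) : List String :=
  -- first loop: 'section_key in menu_items and menu_items[section_key]' is exactly
  -- 'lookup, defaulting to [], is nonempty'; 'isinstance(items, list)' is always true at type List String
  let menu_lines : List String :=
    pvSectionOrder.foldl (fun acc section_key =>
      if !((menu_items.lookup section_key).getD []).isEmpty then
        acc ++ [pvLine section_key ((menu_items.lookup section_key).getD [])]
      else acc) []
  -- second loop, over the dict's items
  menu_items.foldl (fun acc kv =>
    if !(pvSectionOrder.contains kv.1) && !kv.2.isEmpty then
      acc ++ [pvLine kv.1 kv.2]
    else acc) menu_lines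

-- ===== PORT B =====
-- rank = {k: i for i, k in enumerate(section_order)}
def pvRank : PySem.Dict String Int :=
  (PySem.List.enumerate pvSectionOrder).foldl (fun d t => d.insert t.2 t.1) PySem.Dict.empty

def format_menu_items_py_alt (menu_items : List (String × List String)) : List String :=
  let n : Int := PySem.List.len pvSectionOrder
  -- ordered = sorted(enumerate(menu_items.items()), key=lambda t: rank.get(t[1][0], n + t[0]))
  let ordered := PySem.List.sorted (PySem.List.enumerate menu_items)
      (fun t => (pvRank.get? t.2.1).getD (n + t.1)) false
  -- the final comprehension with its 'if v and isinstance(v, list)' guard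
  (ordered.filter (fun t => !t.2.2.isEmpty)).map (fun t => pvLine t.2.1 t.2.2)

-- ===== PRECONDITION & SPEC =====
-- Pre_ excludes association lists with duplicate keys, which cannot arise from the Python
-- dict argument; on them the assoc-list encoding's first-match lookup order is accidental.
def Pre_format_menu_items_py (menu_items : List (String × List String)) : Prop :=
  (menu_items.map Prod.fst).Nodup
instance (menu_items : List (String × List String)) : Decidable (Pre_format_menu_items_py menu_items) := by unfold Pre_format_menu_items_py; infer_instance

def pvWitness_format_menu_items_py : (List (String × List String)) :=
  [("entrees", ["soup", "steak"]), ("sides", ["fries"]), ("drinks", [])]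

def Spec_format_menu_items_py (menu_items : List (String × List String)) (out : List String) : Prop := out = format_menu_items_py_alt menu_items
instance (menu_items : List (String × List String)) (out : List String) : Decidable (Spec_format_menu_items_py menu_items out) := by unfold Spec_format_menu_items_py; infer_instance

-- ===== CLAIM (what is proved, stated in full; the proofs are below) =====
def Claim_equal_format_menu_items_py : Prop := ∀ (menu_items : List (String × List String)), Dom_format_menu_items_py menu_items → Pre_format_menu_items_py menu_items → Spec_format_menu_items_py menu_items (format_menu_items_py menu_items)

-- ===== LEMMAS AND PROOFS =====

-- abbreviations used only by the proofs
def pvKey (t : Int × (String × List String)) : Int := (pvRank.get? t.2.1).getD (7 + t.1)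
def pvC (k : String) : Int := (pvRank.get? k).getD 0
def pvBucket (E : List (Int × (String × List String))) (k : String) :
    List (Int × (String × List String)) := E.filter (fun t => t.2.1 == k)

lemma pv_rank_none (k : String) (hk : pvSectionOrder.contains k = false) :
    pvRank.get? k = none := by
  simp only [pvSectionOrder, List.contains_eq_mem, List.mem_cons, decide_eq_false_iff_not] at hk
  push_neg at hk
  have h1 := hk.1; have h2 := hk.2.1; have h3 := hk.2.2.1; have h4 := hk.2.2.2.1
  have h5 := hk.2.2.2.2.1; have h6 := hk.2.2.2.2.2.1; have h7 := hk.2.2.2.2.2.2.1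
  simp [pvRank, pvSectionOrder, PySem.List.enumerate, PySem.Dict.get?, PySem.Dict.insert,
    PySem.Dict.empty, Ne.symm h1, Ne.symm h2, Ne.symm h3, Ne.symm h4, Ne.symm h5, Ne.symm h6, Ne.symm h7]

lemma pv_rank_facts : ∀ k ∈ pvSectionOrder,
    (pvRank.get? k).isSome = true ∧ 0 ≤ pvC k ∧ pvC k ≤ 6 := by decide

lemma pv_rank_mono : pvSectionOrder.Pairwise (fun a b => pvC a < pvC b) := by decide

-- key of a bucket element is the constant pvC k
lemma pv_key_bucket (k : String) (hk : k ∈ pvSectionOrder)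
    (t : Int × (String × List String)) (ht : t.2.1 = k) : pvKey t = pvC k := by
  obtain ⟨hs, -, -⟩ := pv_rank_facts k hk
  obtain ⟨j, hj⟩ := Option.isSome_iff_exists.1 hs
  simp [pvKey, pvC, ht, hj]

-- with nodup keys, looking up a pair's key returns that pair's value
lemma pv_lookup_self (M : List (String × List String)) (kv : String × List String)
    (hnd : (M.map Prod.fst).Nodup) (hmem : kv ∈ M) : M.lookup kv.1 = some kv.2 := by
  induction M with
  | nil => simp at hmem
  | cons p t ih =>
    simp only [List.map_cons, List.nodup_cons] at hnd
    rcases List.mem_cons.1 hmem with h | h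
    · subst h; simp [List.lookup]
    · have hne : (kv.1 == p.1) = false := by
        apply beq_eq_false_iff_ne.2
        intro hcon
        exact hnd.1 (hcon ▸ List.mem_map_of_mem (f := Prod.fst) h)
      rw [List.lookup, hne]
      simpa using ih hnd.2 h

lemma pv_lookup_none (M : List (String × List String)) (k : String)
    (h : k ∉ M.map Prod.fst) : M.lookup k = none := by
  induction M with
  | nil => rfl
  | cons p t ih =>
    simp only [List.map_cons, List.mem_cons] at h
    push_neg at h
    have : (k == p.1) = false := beq_eq_false_iff_ne.2 h.1
    rw [List.lookup, this]
    exact ih h.2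

-- generic loop-shape helpers
lemma pv_filter_map_eq_flatMap {α β : Type} (l : List α) (p : α → Bool) (g : α → β) :
    (l.filter p).map g = l.flatMap (fun x => if p x then [g x] else []) := by
  induction l with
  | nil => rfl
  | cons x t ih => by_cases h : p x <;> simp [h, ih]

lemma pv_filter_flatMap {α β : Type} (l : List α) (F : α → List β) (p : β → Bool) :
    (l.flatMap F).filter p = l.flatMap (fun x => (F x).filter p) := by
  induction l with
  | nil => rfl
  | cons x t ih => simp [List.flatMap_cons, List.filter_append, ih]

lemma pv_flatMap_congr {α β : Type} (l : List α) (F G : α → List β)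
    (h : ∀ x ∈ l, F x = G x) : l.flatMap F = l.flatMap G := by
  induction l with
  | nil => rfl
  | cons x t ih =>
    simp only [List.flatMap_cons]
    rw [h x (List.mem_cons_self), ih (fun y hy => h y (List.mem_cons_of_mem _ hy))]

lemma pv_filter_or_perm {α : Type} (L : List α) (p q : α → Bool) :
    (L.filter (fun x => p x || q x)).Perm
      (L.filter p ++ L.filter (fun x => !p x && q x)) := by
  induction L with
  | nil => simp
  | cons x t ih =>
    by_cases hp : p x
    · simpa [hp] using ih.cons x
    · by_cases hq : q x
      · simp only [List.filter_cons, hp, hq]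
        exact (ih.cons x).trans List.perm_middle.symm
      · simpa [hp, hq] using ih

-- buckets over a nodup key list are a permutation of the "contains" filter
lemma pv_perm_buckets {α : Type} [DecidableEq α] {β : Type}
    (l : List α) (hl : l.Nodup) (L : List β) (keyf : β → α) :
    (l.flatMap (fun k => L.filter (fun t => keyf t == k))).Perm
      (L.filter (fun t => l.contains (keyf t))) := by
  induction l with
  | nil => simp
  | cons k ks ih =>
    simp only [List.nodup_cons] at hl
    have hperm := pv_filter_or_perm L (fun t => keyf t == k) (fun t => ks.contains (keyf t))
    have hrw : L.filter (fun t => !(keyf t == k) && ks.contains (keyf t))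
        = L.filter (fun t => ks.contains (keyf t)) := by
      apply List.filter_congr
      intro t _
      cases hc : ks.contains (keyf t) with
      | false => simp
      | true =>
        have : (keyf t == k) = false := by
          apply beq_eq_false_iff_ne.2
          intro he
          apply hl.1
          rw [← he]
          simpa using hc
        simp [this]
    have : (L.filter (fun t => (k :: ks).contains (keyf t))).Perm
        (L.filter (fun t => keyf t == k) ++ L.filter (fun t => ks.contains (keyf t))) := by
      have hcond : L.filter (fun t => (k :: ks).contains (keyf t)) =
          L.filter (fun x => keyf x == k || ks.contains (keyf x)) := by
        apply List.filter_congr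
        intro t _
        simp [beq_eq_decide]
      rw [hcond, ← hrw]
      exact hperm
    simp only [List.flatMap_cons]
    exact (List.Perm.append_left _ (ih hl.2)).trans this.symm

-- pairwise-increasing keys over chunks with constant key values
lemma pv_pairwise_flatMap {α β : Type} (l : List α) (F : α → List β)
    (key : β → Int) (c : α → Int)
    (hmono : l.Pairwise (fun a b => c a < c b))
    (hkey : ∀ k ∈ l, ∀ t ∈ F k, key t = c k)
    (hsing : ∀ k ∈ l, (F k).Pairwise (fun a b => key a < key b)) :
    (l.flatMap F).Pairwise (fun a b => key a < key b) := by
  induction l with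
  | nil => simp
  | cons k ks ih =>
    simp only [List.pairwise_cons] at hmono
    simp only [List.flatMap_cons]
    rw [List.pairwise_append]
    refine ⟨hsing k List.mem_cons_self, ih hmono.2
      (fun k' hk' t ht => hkey k' (List.mem_cons_of_mem _ hk') t ht)
      (fun k' hk' => hsing k' (List.mem_cons_of_mem _ hk')), ?_⟩
    intro a ha b hb
    obtain ⟨k', hk', hbk'⟩ := List.mem_flatMap.1 hb
    rw [hkey k List.mem_cons_self a ha, hkey k' (List.mem_cons_of_mem _ hk') b hbk']
    exact hmono.1 k' hk'

-- projecting the enumerate away when both the test and the output only use the pair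
lemma pv_enum_proj (M : List (String × List String)) (s : Int)
    (p : String × List String → Bool) (g : String × List String → String) :
    ((PySem.List.enumerate M s).filter (fun t => p t.2)).map (fun t => g t.2)
      = (M.filter p).map g := by
  induction M generalizing s with
  | nil => rfl
  | cons x t ih =>
    rw [PySem.List.enumerate_cons]
    by_cases h : p x <;> simp [h, ih]

-- the enumerated pairs have pairwise-distinct keys when the dict's keys are nodup
lemma pv_enum_ne (M : List (String × List String)) (hnd : (M.map Prod.fst).Nodup) :
    (PySem.List.enumerate M).Pairwise (fun a b => a.2.1 ≠ b.2.1) := by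
  have hm : (PySem.List.enumerate M).map (fun t => t.2.1) = M.map Prod.fst := by
    conv_rhs => rw [← PySem.List.map_snd_enumerate M 0]
    rw [List.map_map]
    rfl
  have := hm ▸ hnd
  exact (List.pairwise_map.1 this)

-- one bucket, emitted, is exactly A's per-section conditional line
lemma pv_peq (M : List (String × List String)) (hnd : (M.map Prod.fst).Nodup) (k : String) :
    ((pvBucket (PySem.List.enumerate M) k).filter (fun t => !t.2.2.isEmpty)).map
        (fun t => pvLine t.2.1 t.2.2)
      = if !((M.lookup k).getD []).isEmpty then [pvLine k ((M.lookup k).getD [])] else [] := by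
  have hpw := (pv_enum_ne M hnd).filter (fun t => t.2.1 == k)
  cases hb : pvBucket (PySem.List.enumerate M) k with
  | nil =>
    have hnm : k ∉ M.map Prod.fst := by
      intro hk
      obtain ⟨kv, hkv, hfst⟩ := List.mem_map.1 hk
      have : kv ∈ (PySem.List.enumerate M).map (fun t => t.2) := by
        rw [PySem.List.map_snd_enumerate]; exact hkv
      obtain ⟨t, ht, hts⟩ := List.mem_map.1 this
      have : t ∈ pvBucket (PySem.List.enumerate M) k := by
        apply List.mem_filter.2
        exact ⟨ht, by simp [hts, hfst]⟩
      simp [hb] at this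
    rw [pv_lookup_none M k hnm]
    simp
  | cons t rest =>
    have hrest : rest = [] := by
      cases rest with
      | nil => rfl
      | cons u us =>
        have hpw' : (pvBucket (PySem.List.enumerate M) k).Pairwise
            (fun a b => a.2.1 ≠ b.2.1) := hpw
        rw [hb] at hpw'
        have h1 := (List.pairwise_cons.1 hpw').1 u (List.mem_cons_self)
        have ht' : t ∈ pvBucket (PySem.List.enumerate M) k := by rw [hb]; exact List.mem_cons_self
        have hu' : u ∈ pvBucket (PySem.List.enumerate M) k := by
          rw [hb]; exact List.mem_cons_of_mem _ List.mem_cons_self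
        have htk := of_decide_eq_true (List.mem_filter.1 ht').2
        have huk := of_decide_eq_true (List.mem_filter.1 hu').2
        exact absurd (htk.trans huk.symm) h1
    subst hrest
    have ht' : t ∈ pvBucket (PySem.List.enumerate M) k := by rw [hb]; exact List.mem_cons_self
    have htE := (List.mem_filter.1 ht').1
    have htk : t.2.1 = k := of_decide_eq_true (List.mem_filter.1 ht').2
    have htM : t.2 ∈ M := by
      rw [← PySem.List.map_snd_enumerate M 0]
      exact List.mem_map_of_mem htE
    have hlk : M.lookup k = some t.2.2 := htk ▸ pv_lookup_self M t.2 hnd htM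
    rw [hlk]
    by_cases he : t.2.2.isEmpty <;> simp [he, htk]

set_option maxHeartbeats 2000000 in
theorem pv_main (M : List (String × List String))
    (hnd : (M.map Prod.fst).Nodup) :
    format_menu_items_py M = format_menu_items_py_alt M := by
  simp only [format_menu_items_py, format_menu_items_py_alt]
  rw [PySem.List.foldl_append_if, PySem.List.foldl_append_if]
  simp only [List.nil_append]
  have hkeyfun : (fun t : Int × (String × List String) =>
      (pvRank.get? t.2.1).getD ((PySem.List.len pvSectionOrder : Int) + t.1)) = pvKey := by
    funext t; rfl
  rw [hkeyfun]
  -- name the sorted order: present-section buckets in section order, then the leftovers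
  have hsort : PySem.List.sorted (PySem.List.enumerate M) pvKey false
      = pvSectionOrder.flatMap (pvBucket (PySem.List.enumerate M))
        ++ (PySem.List.enumerate M).filter (fun t => !pvSectionOrder.contains t.2.1) := by
    apply PySem.List.sorted_eq_of_perm_of_pairwise_lt
    · -- permutation
      have h1 := pv_perm_buckets pvSectionOrder (by decide) (PySem.List.enumerate M)
        (fun t => t.2.1)
      have h2 := List.filter_append_perm
        (fun t : Int × (String × List String) => pvSectionOrder.contains t.2.1)
        (PySem.List.enumerate M)
      exact (List.Perm.append h1 (List.Perm.refl _)).trans h2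
    · -- strictly increasing keys
      rw [List.pairwise_append]
      refine ⟨?_, ?_, ?_⟩
      · apply pv_pairwise_flatMap pvSectionOrder _ pvKey pvC pv_rank_mono
        · intro k hk t ht
          exact pv_key_bucket k hk t (of_decide_eq_true (List.mem_filter.1 ht).2)
        · intro k hk
          apply ((pv_enum_ne M hnd).filter _).imp_of_mem
          intro a b ha hb hne
          have hak : a.2.1 = k := of_decide_eq_true (List.mem_filter.1 ha).2
          have hbk : b.2.1 = k := of_decide_eq_true (List.mem_filter.1 hb).2
          exact absurd (hak.trans hbk.symm) hne
      · apply ((PySem.List.pairwise_lt_enumerate M 0).filter _).imp_of_mem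
        intro a b ha hb hab
        have hac : pvSectionOrder.contains a.2.1 = false := by
          simpa using (List.mem_filter.1 ha).2
        have hbc : pvSectionOrder.contains b.2.1 = false := by
          simpa using (List.mem_filter.1 hb).2
        simp only [pvKey, pv_rank_none _ hac, pv_rank_none _ hbc, Option.getD_none]
        omega
      · intro a ha b hb
        obtain ⟨k, hk, hak⟩ := List.mem_flatMap.1 ha
        have hkey_a : pvKey a = pvC k :=
          pv_key_bucket k hk a (of_decide_eq_true (List.mem_filter.1 hak).2)
        obtain ⟨-, -, hc6⟩ := pv_rank_facts k hk
        have hbc : pvSectionOrder.contains b.2.1 = false := by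
          simpa using (List.mem_filter.1 hb).2
        have hbE := (List.mem_filter.1 hb).1
        obtain ⟨j, hj, hbj⟩ := (PySem.List.mem_enumerate_iff M 0 b).1 hbE
        have hb1 : 0 ≤ b.1 := by rw [hbj]; simp
        rw [hkey_a]
        simp only [pvKey, pv_rank_none _ hbc, Option.getD_none]
        omega
  rw [hsort, List.filter_append, List.map_append]
  congr 1
  · -- the fixed-section part
    rw [pv_filter_flatMap, List.map_flatMap,
      pv_filter_map_eq_flatMap pvSectionOrder
        (fun k => !((M.lookup k).getD []).isEmpty)
        (fun k => pvLine k ((M.lookup k).getD []))]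
    apply pv_flatMap_congr
    intro k _
    exact (pv_peq M hnd k).symm ▸ rfl
  · -- the leftover part
    rw [List.filter_filter]
    have hcomm : (PySem.List.enumerate M).filter
          (fun a => !a.2.2.isEmpty && !pvSectionOrder.contains a.2.1)
        = (PySem.List.enumerate M).filter
          (fun a => !pvSectionOrder.contains a.2.1 && !a.2.2.isEmpty) := by
      apply List.filter_congr
      intro t _
      exact Bool.and_comm _ _
    rw [hcomm]
    exact (pv_enum_proj M 0 (fun kv => !pvSectionOrder.contains kv.1 && !kv.2.isEmpty)
      (fun kv => pvLine kv.1 kv.2)).symm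

-- ===== VERDICT (by name: the statement is the Claim_ definition above) =====
theorem format_menu_items_py_spec : Claim_equal_format_menu_items_py := by
  intro menu_items _ hpre
  exact pv_main menu_items hpre
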